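-- pv_equiv track=rewrite | github.com/alexanderjuxoncobb/selenium-hacker-news-scraper | interest_learner.py | _is_related_term
-- ===== SOURCE A (Python) =====
-- def _is_related_term(feedback_keyword: str, interest_keyword: str) -> bool:
--     """Check if feedback keyword is related to an interest"""
--     # Define related terms that should affect certain interests
--     related_terms = {
--         "artificial intelligence": ["neural", "deep", "learning", "model", "training", "inference", "llm", "gpt", "claude", "openai", "anthropic"],
--         "machine learning": ["neural", "deep", "model", "training", "algorithm", "prediction", "classification", "regression"],
--         "programming": ["code", "coding", "developer", "software", "bug", "debug", "github", "commit", "function", "variable"],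
--         "tech startups": ["funding", "seed", "series", "venture", "capital", "investors", "ipo", "unicorn", "valuation"],
--         "mathematics": ["algorithm", "equation", "formula", "calculation", "statistics", "probability", "theorem"],
--         "statistics": ["data", "analysis", "probability", "distribution", "correlation", "regression", "variance"],
--         "robotics": ["robot", "automation", "mechanical", "sensor", "actuator", "autonomous"],
--         "hardware": ["chip", "processor", "memory", "storage", "semiconductor", "silicon", "gpu", "cpu"]
--     }
--
--     interest_lower = interest_keyword.lower()
--     feedback_lower = feedback_keyword.lower()
--
--     # Check if feedback keyword is in the related terms for this interest
--     for interest_key, related_list in related_terms.items():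
--         if interest_key in interest_lower:
--             if feedback_lower in related_list:
--                 return True
--
--     return False
-- ===== SOURCE B (Python) =====
-- # Inverted index, written out once: related term -> interest keys whose
-- # related-term list contains it (derived from A's related_terms table).
-- _TERM_TO_INTERESTS = {
--     "neural": ["artificial intelligence", "machine learning"],
--     "deep": ["artificial intelligence", "machine learning"],
--     "learning": ["artificial intelligence"],
--     "model": ["artificial intelligence", "machine learning"],
--     "training": ["artificial intelligence", "machine learning"],
--     "inference": ["artificial intelligence"],
--     "llm": ["artificial intelligence"],
--     "gpt": ["artificial intelligence"],
--     "claude": ["artificial intelligence"],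
--     "openai": ["artificial intelligence"],
--     "anthropic": ["artificial intelligence"],
--     "algorithm": ["machine learning", "mathematics"],
--     "prediction": ["machine learning"],
--     "classification": ["machine learning"],
--     "regression": ["machine learning", "statistics"],
--     "code": ["programming"],
--     "coding": ["programming"],
--     "developer": ["programming"],
--     "software": ["programming"],
--     "bug": ["programming"],
--     "debug": ["programming"],
--     "github": ["programming"],
--     "commit": ["programming"],
--     "function": ["programming"],
--     "variable": ["programming"],
--     "funding": ["tech startups"],
--     "seed": ["tech startups"],
--     "series": ["tech startups"],
--     "venture": ["tech startups"],
--     "capital": ["tech startups"],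
--     "investors": ["tech startups"],
--     "ipo": ["tech startups"],
--     "unicorn": ["tech startups"],
--     "valuation": ["tech startups"],
--     "equation": ["mathematics"],
--     "formula": ["mathematics"],
--     "calculation": ["mathematics"],
--     "statistics": ["mathematics"],
--     "probability": ["mathematics", "statistics"],
--     "theorem": ["mathematics"],
--     "data": ["statistics"],
--     "analysis": ["statistics"],
--     "distribution": ["statistics"],
--     "correlation": ["statistics"],
--     "variance": ["statistics"],
--     "robot": ["robotics"],
--     "automation": ["robotics"],
--     "mechanical": ["robotics"],
--     "sensor": ["robotics"],
--     "actuator": ["robotics"],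
--     "autonomous": ["robotics"],
--     "chip": ["hardware"],
--     "processor": ["hardware"],
--     "memory": ["hardware"],
--     "storage": ["hardware"],
--     "semiconductor": ["hardware"],
--     "silicon": ["hardware"],
--     "gpu": ["hardware"],
--     "cpu": ["hardware"],
-- }
--
--
-- def _is_related_term(feedback_keyword: str, interest_keyword: str) -> bool:
--     """Check if feedback keyword is related to an interest"""
--     interest_lower = interest_keyword.lower()
--     candidates = _TERM_TO_INTERESTS.get(feedback_keyword.lower(), ())
--     return any(key in interest_lower for key in candidates)
-- ===== Notes on version B (the rewrite author's own statement) =====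
-- stated objective: idiomatic
-- what changed: B looks the lowercased feedback term up in a precomputed inverted index (related term -> interest keys) and checks its few candidate keys for substring membership, instead of scanning all eight interest entries and their term lists on every call.
import Mathlib
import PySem

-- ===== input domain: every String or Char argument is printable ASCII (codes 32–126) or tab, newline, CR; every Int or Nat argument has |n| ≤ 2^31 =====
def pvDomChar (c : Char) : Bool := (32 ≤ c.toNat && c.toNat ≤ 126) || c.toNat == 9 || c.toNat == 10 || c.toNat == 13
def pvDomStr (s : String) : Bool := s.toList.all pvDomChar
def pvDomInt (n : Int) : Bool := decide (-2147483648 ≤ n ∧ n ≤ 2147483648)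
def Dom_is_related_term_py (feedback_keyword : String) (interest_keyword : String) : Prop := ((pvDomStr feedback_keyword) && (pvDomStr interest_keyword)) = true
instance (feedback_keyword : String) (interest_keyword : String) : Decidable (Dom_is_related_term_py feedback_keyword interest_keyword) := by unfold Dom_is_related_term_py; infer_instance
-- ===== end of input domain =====

-- B replaces A's per-call scan of all eight interest entries by one lookup of the
-- lowercased feedback term in a precomputed inverted index (objective: idiomatic).

-- ===== PORT A =====
-- the literal dict `related_terms` of A (keys distinct, insertion order)
def pvRelatedTerms : PySem.Dict String (List String) := PySem.Dict.mk
  [ ("artificial intelligence", ["neural", "deep", "learning", "model", "training", "inference", "llm", "gpt", "claude", "openai", "anthropic"]),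
    ("machine learning", ["neural", "deep", "model", "training", "algorithm", "prediction", "classification", "regression"]),
    ("programming", ["code", "coding", "developer", "software", "bug", "debug", "github", "commit", "function", "variable"]),
    ("tech startups", ["funding", "seed", "series", "venture", "capital", "investors", "ipo", "unicorn", "valuation"]),
    ("mathematics", ["algorithm", "equation", "formula", "calculation", "statistics", "probability", "theorem"]),
    ("statistics", ["data", "analysis", "probability", "distribution", "correlation", "regression", "variance"]),
    ("robotics", ["robot", "automation", "mechanical", "sensor", "actuator", "autonomous"]),
    ("hardware", ["chip", "processor", "memory", "storage", "semiconductor", "silicon", "gpu", "cpu"]) ]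

-- A's `for interest_key, related_list in related_terms.items(): …` with early return
def pvLoopA (interest_lower feedback_lower : String) : List (String × List String) → Bool
  | [] => false
  | (interest_key, related_list) :: rest =>
    if PySem.Str.isIn interest_key interest_lower then
      if related_list.contains feedback_lower then true
      else pvLoopA interest_lower feedback_lower rest
    else pvLoopA interest_lower feedback_lower rest

def is_related_term_py (feedback_keyword : String) (interest_keyword : String) : Bool :=
  let interest_lower := PySem.Str.lower interest_keyword
  let feedback_lower := PySem.Str.lower feedback_keyword
  pvLoopA interest_lower feedback_lower pvRelatedTerms.items

-- ===== PORT B =====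
-- the literal inverted index `_TERM_TO_INTERESTS` of Source B: related term -> interest keys
def pvTermToInterests : PySem.Dict String (List String) := PySem.Dict.mk
  [ ("neural", ["artificial intelligence", "machine learning"]),
    ("deep", ["artificial intelligence", "machine learning"]),
    ("learning", ["artificial intelligence"]),
    ("model", ["artificial intelligence", "machine learning"]),
    ("training", ["artificial intelligence", "machine learning"]),
    ("inference", ["artificial intelligence"]),
    ("llm", ["artificial intelligence"]),
    ("gpt", ["artificial intelligence"]),
    ("claude", ["artificial intelligence"]),
    ("openai", ["artificial intelligence"]),
    ("anthropic", ["artificial intelligence"]),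
    ("algorithm", ["machine learning", "mathematics"]),
    ("prediction", ["machine learning"]),
    ("classification", ["machine learning"]),
    ("regression", ["machine learning", "statistics"]),
    ("code", ["programming"]),
    ("coding", ["programming"]),
    ("developer", ["programming"]),
    ("software", ["programming"]),
    ("bug", ["programming"]),
    ("debug", ["programming"]),
    ("github", ["programming"]),
    ("commit", ["programming"]),
    ("function", ["programming"]),
    ("variable", ["programming"]),
    ("funding", ["tech startups"]),
    ("seed", ["tech startups"]),
    ("series", ["tech startups"]),
    ("venture", ["tech startups"]),
    ("capital", ["tech startups"]),
    ("investors", ["tech startups"]),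
    ("ipo", ["tech startups"]),
    ("unicorn", ["tech startups"]),
    ("valuation", ["tech startups"]),
    ("equation", ["mathematics"]),
    ("formula", ["mathematics"]),
    ("calculation", ["mathematics"]),
    ("statistics", ["mathematics"]),
    ("probability", ["mathematics", "statistics"]),
    ("theorem", ["mathematics"]),
    ("data", ["statistics"]),
    ("analysis", ["statistics"]),
    ("distribution", ["statistics"]),
    ("correlation", ["statistics"]),
    ("variance", ["statistics"]),
    ("robot", ["robotics"]),
    ("automation", ["robotics"]),
    ("mechanical", ["robotics"]),
    ("sensor", ["robotics"]),
    ("actuator", ["robotics"]),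
    ("autonomous", ["robotics"]),
    ("chip", ["hardware"]),
    ("processor", ["hardware"]),
    ("memory", ["hardware"]),
    ("storage", ["hardware"]),
    ("semiconductor", ["hardware"]),
    ("silicon", ["hardware"]),
    ("gpu", ["hardware"]),
    ("cpu", ["hardware"]) ]

def is_related_term_py_alt (feedback_keyword : String) (interest_keyword : String) : Bool :=
  let interest_lower := PySem.Str.lower interest_keyword
  let candidates := pvTermToInterests.getD (PySem.Str.lower feedback_keyword) []
  candidates.any (fun key => PySem.Str.isIn key interest_lower)

-- ===== PRECONDITION & SPEC =====
def Spec_is_related_term_py (feedback_keyword : String) (interest_keyword : String) (out : Bool) : Prop := out = is_related_term_py_alt feedback_keyword interest_keyword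
instance (feedback_keyword : String) (interest_keyword : String) (out : Bool) : Decidable (Spec_is_related_term_py feedback_keyword interest_keyword out) := by unfold Spec_is_related_term_py; infer_instance

-- ===== CLAIM (what is proved, stated in full; the proofs are below) =====
def Claim_equal_is_related_term_py : Prop := ∀ (feedback_keyword : String) (interest_keyword : String), Dom_is_related_term_py feedback_keyword interest_keyword → Spec_is_related_term_py feedback_keyword interest_keyword (is_related_term_py feedback_keyword interest_keyword)

-- ===== LEMMAS AND PROOFS =====

-- A's early-return loop is `any` of (key is substring) && (feedback in list)
theorem pvLoopA_eq_any (il fl : String) (items : List (String × List String)) :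
    pvLoopA il fl items =
      items.any (fun p => PySem.Str.isIn p.1 il && p.2.contains fl) := by
  induction items with
  | nil => rfl
  | cons p rest ih =>
    obtain ⟨k, l⟩ := p
    rcases Bool.eq_false_or_eq_true (PySem.Chars.isIn k.toList il.toList) with h1 | h1 <;>
      by_cases h2 : fl ∈ l <;>
        simp [pvLoopA, ih, h1, h2]

-- proof-side inversion of A's table: fold over all (term, key) pairs
def pvInvert (items : List (String × List String)) : PySem.Dict String (List String) :=
  (items.flatMap (fun p => p.2.map (fun t => (t, p.1)))).foldl
    (fun d q => d.modify q.1 [] (· ++ [q.2])) PySem.Dict.empty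

-- the literal inverted index of port B is exactly the inversion of A's table
set_option maxRecDepth 10000 in
theorem pvTermToInterests_eq_invert : pvTermToInterests = pvInvert pvRelatedTerms.items := by
  decide

-- any of (p x && c) pulls the constant out
theorem any_and_const {α : Type} (l : List α) (p : α → Bool) (c : Bool) :
    l.any (fun x => p x && c) = (l.any p && c) := by
  induction l with
  | nil => simp
  | cons x xs ih => cases c <;> simp_all

theorem is_related_term_py_eq_alt (fk ik : String) :
    is_related_term_py fk ik = is_related_term_py_alt fk ik := by
  unfold is_related_term_py is_related_term_py_alt
  rw [pvLoopA_eq_any, pvTermToInterests_eq_invert]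
  unfold pvInvert
  rw [PySem.Dict.getD_foldl_modify_append]
  dsimp only
  rw [PySem.Dict.getD_empty, List.nil_append, List.any_map, List.any_filter, List.any_flatMap]
  refine List.any_congr rfl fun p => ?_
  rw [List.any_map]
  simp only [Function.comp_def]
  rw [any_and_const, Bool.and_comm, List.any_beq']

-- ===== VERDICT (by name: the statement is the Claim_ definition above) =====
theorem is_related_term_py_spec : Claim_equal_is_related_term_py := by
  intro fk ik _
  unfold Spec_is_related_term_py
  exact is_related_term_py_eq_alt fk ik
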